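-- pv_equiv track=rewrite | github.com/Jang3mar/Python | Months.py | Eachmonth
-- ===== SOURCE A (Python) =====
-- def Eachmonth(month, y):
--     for i in range(month + 1):
--         if i // 10 >= 1:
--             y += i % 10
--             y += i // 10
--         else:
--             y += i
--     return y
-- ===== SOURCE B (Python) =====
-- def Eachmonth(month, y):
--     # Closed-form O(1): sum of i for i<10 plus digit-split sums for 10..month.
--     if month < 0:
--         return y
--     if month < 10:
--         return y + month * (month + 1) // 2
--     q, r = divmod(month, 10)
--     return y + 45 * q + r * (r + 1) // 2 + 5 * q * (q - 1) + (r + 1) * q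
-- ===== Notes on version B (the rewrite author's own statement) =====
-- stated objective: faster
-- what changed: Replaced the O(month) loop summing f(i)=i (i<10) or i%10+i//10 (i>=10) by a closed-form O(1) formula using the triangular-number and decade-sum identities.
import Mathlib
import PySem

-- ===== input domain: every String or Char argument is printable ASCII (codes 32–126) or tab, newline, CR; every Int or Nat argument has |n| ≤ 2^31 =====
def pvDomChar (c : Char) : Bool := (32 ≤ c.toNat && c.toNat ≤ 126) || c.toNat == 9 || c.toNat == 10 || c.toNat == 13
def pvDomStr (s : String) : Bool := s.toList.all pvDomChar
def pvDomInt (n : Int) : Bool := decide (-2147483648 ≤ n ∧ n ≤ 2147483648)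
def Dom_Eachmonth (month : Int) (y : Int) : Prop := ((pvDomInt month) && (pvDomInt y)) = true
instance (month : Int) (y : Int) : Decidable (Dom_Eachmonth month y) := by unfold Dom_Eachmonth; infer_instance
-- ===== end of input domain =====

-- B replaces A's O(month) loop by a closed-form O(1) arithmetic formula (objective: faster).

-- ===== PORT A =====
def Eachmonth (month : Int) (y : Int) : Int :=
  (PySem.List.pyRange 0 (month + 1) 1).foldl
    (fun y i =>
      if PySem.Int.floordiv i 10 ≥ 1 then
        (y + PySem.Int.mod i 10) + PySem.Int.floordiv i 10
      else
        y + i) y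

-- ===== PORT B =====
def Eachmonth_alt (month : Int) (y : Int) : Int :=
  if month < 0 then y
  else if month < 10 then y + PySem.Int.floordiv (month * (month + 1)) 2
  else
    let q := PySem.Int.floordiv month 10
    let r := PySem.Int.mod month 10
    y + 45 * q + PySem.Int.floordiv (r * (r + 1)) 2 + 5 * q * (q - 1) + (r + 1) * q

-- ===== PRECONDITION & SPEC =====
def Spec_Eachmonth (month : Int) (y : Int) (out : Int) : Prop := out = Eachmonth_alt month y
instance (month : Int) (y : Int) (out : Int) : Decidable (Spec_Eachmonth month y out) := by unfold Spec_Eachmonth; infer_instance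

-- ===== CLAIM (what is proved, stated in full; the proofs are below) =====
def Claim_equal_Eachmonth : Prop := ∀ (month : Int) (y : Int), Dom_Eachmonth month y → Spec_Eachmonth month y (Eachmonth month y)

-- ===== LEMMAS AND PROOFS =====

theorem pvFd10 (a : Int) : PySem.Int.floordiv a 10 = a / 10 :=
  PySem.Int.floordiv_eq_ediv_of_pos (by norm_num)

theorem pvFd2 (a : Int) : PySem.Int.floordiv a 2 = a / 2 :=
  PySem.Int.floordiv_eq_ediv_of_pos (by norm_num)

theorem pvMod10 (a : Int) : PySem.Int.mod a 10 = a % 10 :=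
  PySem.Int.mod_eq_emod_of_pos (by norm_num)

theorem Eachmonth_neg (month y : Int) (h : month < 0) : Eachmonth month y = y := by
  unfold Eachmonth
  rw [PySem.List.pyRange_one_eq_nil (by omega)]
  rfl

theorem Eachmonth_step (m y : Int) (h : 0 ≤ m) :
    Eachmonth m y = Eachmonth (m - 1) y + (if 1 ≤ m / 10 then m % 10 + m / 10 else m) := by
  unfold Eachmonth
  rw [PySem.List.pyRange_one_succ_right h, List.foldl_append, show m - 1 + 1 = m by ring]
  simp only [List.foldl, pvFd10, pvMod10, ge_iff_le]
  split_ifs <;> ring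

theorem Eachmonth_alt_step (m y : Int) (h : 0 ≤ m) :
    Eachmonth_alt m y = Eachmonth_alt (m - 1) y + (if 1 ≤ m / 10 then m % 10 + m / 10 else m) := by
  unfold Eachmonth_alt
  simp only [pvFd10, pvFd2, pvMod10]
  rcases lt_or_ge m 10 with h10 | h10
  · -- 0 ≤ m ≤ 9 : both sides use the triangular branch (or the empty case at m = 0)
    interval_cases m <;> norm_num <;> omega
  · rcases eq_or_lt_of_le h10 with h10 | h11
    · -- m = 10 : previous value comes from the triangular branch
      subst h10; norm_num
    · -- 11 ≤ m : both sides use the decade formula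
      have hq : 1 ≤ m / 10 := by omega
      have hq' : 1 ≤ (m - 1) / 10 := by omega
      rw [if_neg (by omega), if_neg (by omega), if_neg (by omega), if_neg (by omega),
          if_pos hq]
      set q := m / 10 with hqdef
      set r := m % 10 with hrdef
      have hm : m = 10 * q + r := by omega
      have hr0 : 0 ≤ r := by omega
      have hr9 : r < 10 := by omega
      rcases eq_or_lt_of_le hr0 with hr | hr
      · -- r = 0 : the decade rolls over, (m-1)/10 = q-1, (m-1)%10 = 9
        have e1 : (m - 1) / 10 = q - 1 := by omega
        have e2 : (m - 1) % 10 = 9 := by omega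
        rw [e1, e2, ← hr]
        norm_num
        ring
      · -- 1 ≤ r : same decade, (m-1)/10 = q, (m-1)%10 = r-1
        have e1 : (m - 1) / 10 = q := by omega
        have e2 : (m - 1) % 10 = r - 1 := by omega
        have e3 : r * (r + 1) = (r - 1) * r + r * 2 := by ring
        rw [e1, e2, e3, Int.add_mul_ediv_right _ _ (by norm_num : (2:Int) ≠ 0)]
        ring

theorem Eachmonth_agree (n : Nat) (y : Int) :
    Eachmonth (n : Int) y = Eachmonth_alt (n : Int) y := by
  induction n with
  | zero =>
    simp only [Nat.cast_zero]
    rw [Eachmonth_step 0 y le_rfl, Eachmonth_neg (0 - 1) y (by norm_num)]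
    norm_num [Eachmonth_alt, pvFd2]
  | succ k ih =>
    have hk : (0:Int) ≤ (k : Int) + 1 := by positivity
    push_cast
    rw [Eachmonth_step _ y hk, Eachmonth_alt_step _ y hk,
        show ((k : Int) + 1) - 1 = (k : Int) by ring, ih]

-- ===== VERDICT (by name: the statement is the Claim_ definition above) =====
theorem Eachmonth_spec : Claim_equal_Eachmonth := by
  intro month y _
  unfold Spec_Eachmonth
  rcases lt_or_ge month 0 with h | h
  · rw [Eachmonth_neg month y h, Eachmonth_alt, if_pos h]
  · have := Eachmonth_agree month.toNat y
    rwa [Int.toNat_of_nonneg h] at this
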